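-- pv_equiv track=rewrite | github.com/romainhry/adventofcode2022 | day03/items_rucksack.py | computePriorityInItemGroup
-- ===== SOURCE A (Python) =====
-- def computePriority(item):
--     offset_cap = ord("A") - 27
--     offset_low = ord("a") - 1
--     if item >="a":
--         return ord(item) - offset_low
--     else:
--         return ord(item) - offset_cap
--
-- def computePriorityInItemGroup(items):
--     for item in items[0]:
--         is_common = True
--         for items_to_check in items[1:]:
--             if item not in items_to_check:
--                 is_common = False
--                 break
--         if is_common:
--             return computePriority(item)
-- ===== SOURCE B (Python) =====
-- def computePriority(item):
--     offset_cap = ord("A") - 27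
--     offset_low = ord("a") - 1
--     if item >= "a":
--         return ord(item) - offset_low
--     else:
--         return ord(item) - offset_cap
--
-- def computePriorityInItemGroup(items):
--     # Build the common-item set once, then one ordered pass over items[0].
--     common = set(items[0])
--     for s in items[1:]:
--         common &= set(s)
--     for item in items[0]:
--         if item in common:
--             return computePriority(item)
--     return None
-- ===== Notes on version B (the rewrite author's own statement) =====
-- stated objective: simpler
-- what changed: Replaces A's nested per-character scan of all other strings by one up-front set-intersection reduction followed by a single ordered pass over items[0].
import Mathlib
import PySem

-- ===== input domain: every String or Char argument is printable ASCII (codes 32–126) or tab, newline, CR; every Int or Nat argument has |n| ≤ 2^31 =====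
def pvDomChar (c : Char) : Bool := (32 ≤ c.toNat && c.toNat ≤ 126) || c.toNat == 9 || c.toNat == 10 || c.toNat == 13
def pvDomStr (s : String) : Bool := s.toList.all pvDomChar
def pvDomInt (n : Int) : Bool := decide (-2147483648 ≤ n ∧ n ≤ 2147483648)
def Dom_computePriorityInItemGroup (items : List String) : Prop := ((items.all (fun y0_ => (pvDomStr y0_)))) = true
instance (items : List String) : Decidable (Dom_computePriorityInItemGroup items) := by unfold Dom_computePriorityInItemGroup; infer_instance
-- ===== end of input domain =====

-- B builds the common-item set once by intersection, then scans items[0] once; simpler than A's nested scans.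


-- ===== PORT A =====
def computePriority (item : Char) : Int :=
  if 'a' ≤ item then (item.toNat : Int) - (('a'.toNat : Int) - 1)
  else (item.toNat : Int) - (('A'.toNat : Int) - 27)

-- inner loop: "for items_to_check in items[1:]: if item not in items_to_check: break"
def pvInnerA (item : Char) : List String → Bool
  | [] => true
  | s :: rest => if !(s.toList.contains item) then false else pvInnerA item rest

-- outer loop over items[0]'s characters
def pvOuterA (tail : List String) : List Char → Option Int
  | [] => none
  | c :: cs => if pvInnerA c tail then some (computePriority c) else pvOuterA tail cs

def computePriorityInItemGroup (items : List String) : Option Int :=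
  match items with
  | [] => none          -- Python raises IndexError here; excluded by Pre_
  | h :: t => pvOuterA t h.toList

-- ===== PORT B =====
-- single ordered pass over items[0] against the precomputed common set
def pvScanB (common : PySem.Set Char) : List Char → Option Int
  | [] => none
  | c :: cs => if common.contains c then some (computePriority c) else pvScanB common cs

def computePriorityInItemGroup_alt (items : List String) : Option Int :=
  match items with
  | [] => none          -- Python raises IndexError here; excluded by Pre_
  | h :: t =>
    let common := t.foldl (fun acc s => PySem.Set.inter acc (PySem.Set.ofList s.toList))
      (PySem.Set.ofList h.toList)
    pvScanB common h.toList

-- ===== PRECONDITION & SPEC =====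
-- Pre_ excludes only the empty list, on which A raises IndexError (items[0]).
def Pre_computePriorityInItemGroup (items : List String) : Prop := items ≠ []
instance (items : List String) : Decidable (Pre_computePriorityInItemGroup items) := by unfold Pre_computePriorityInItemGroup; infer_instance
def pvWitness_computePriorityInItemGroup : List String := ["abc", "cde"]

def Spec_computePriorityInItemGroup (items : List String) (out : Option Int) : Prop := out = computePriorityInItemGroup_alt items
instance (items : List String) (out : Option Int) : Decidable (Spec_computePriorityInItemGroup items out) := by unfold Spec_computePriorityInItemGroup; infer_instance

-- ===== CLAIM (what is proved, stated in full; the proofs are below) =====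
def Claim_equal_computePriorityInItemGroup : Prop := ∀ (items : List String), Dom_computePriorityInItemGroup items → Pre_computePriorityInItemGroup items → Spec_computePriorityInItemGroup items (computePriorityInItemGroup items)

-- ===== LEMMAS AND PROOFS =====
lemma innerA_iff (c : Char) (t : List String) :
    pvInnerA c t = true ↔ ∀ s ∈ t, c ∈ s.toList := by
  induction t with
  | nil => simp [pvInnerA]
  | cons s rest ih =>
    simp only [pvInnerA, List.mem_cons]
    by_cases hc : c ∈ s.toList
    · simp only [List.contains_iff_mem.mpr hc, Bool.not_true,
        Bool.false_eq_true, if_false, ih]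
      constructor
      · intro h x hx; rcases hx with rfl | hx
        · exact hc
        · exact h x hx
      · intro h x hx; exact h x (Or.inr hx)
    · have hc' : s.toList.contains c = false := by
        simp [hc]
      simp only [hc', Bool.not_false, if_true]
      exact ⟨fun h => absurd h (by simp), fun h => absurd (h s (Or.inl rfl)) hc⟩

lemma mem_fold (t : List String) (acc : PySem.Set Char) (c : Char) :
    c ∈ (t.foldl (fun acc s => PySem.Set.inter acc (PySem.Set.ofList s.toList)) acc)
      ↔ c ∈ acc ∧ ∀ s ∈ t, c ∈ s.toList := by
  induction t generalizing acc with
  | nil => simp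
  | cons s rest ih =>
    simp only [List.foldl_cons, ih, PySem.Set.mem_inter, PySem.Set.mem_ofList, List.mem_cons]
    constructor
    · rintro ⟨⟨h1, h2⟩, h3⟩
      refine ⟨h1, fun x hx => ?_⟩
      rcases hx with rfl | hx
      · exact h2
      · exact h3 x hx
    · rintro ⟨h1, h2⟩
      exact ⟨⟨h1, h2 s (Or.inl rfl)⟩, fun x hx => h2 x (Or.inr hx)⟩

lemma scan_eq (t : List String) (h : List Char) (cs : List Char)
    (hsub : ∀ c ∈ cs, c ∈ h) :
    pvScanB (t.foldl (fun acc s => PySem.Set.inter acc (PySem.Set.ofList s.toList))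
      (PySem.Set.ofList h)) cs = pvOuterA t cs := by
  induction cs with
  | nil => rfl
  | cons c cs ih =>
    have hc : c ∈ h := hsub c (by simp)
    have heq : ((t.foldl (fun acc s => PySem.Set.inter acc (PySem.Set.ofList s.toList))
        (PySem.Set.ofList h)).contains c) = pvInnerA c t := by
      rw [Bool.eq_iff_iff, PySem.Set.contains_iff, mem_fold, innerA_iff,
        PySem.Set.mem_ofList]
      exact ⟨fun ⟨_, h2⟩ => h2, fun h2 => ⟨hc, h2⟩⟩
    simp only [pvScanB, pvOuterA, heq]
    split <;> [rfl; exact ih (fun x hx => hsub x (by simp [hx]))]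

-- ===== VERDICT (by name: the statement is the Claim_ definition above) =====
theorem computePriorityInItemGroup_spec : Claim_equal_computePriorityInItemGroup := by
  intro items _ hpre
  unfold Spec_computePriorityInItemGroup
  match items with
  | [] => exact absurd rfl hpre
  | h :: t =>
    simp only [computePriorityInItemGroup, computePriorityInItemGroup_alt]
    exact (scan_eq t h.toList h.toList (fun _ hx => hx)).symm
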